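-- pv_equiv track=rewrite | github.com/saiimonn/python | Deep-ML/linear-algebra/vector-to-diagonal-matrix.py | make_diagonal
-- ===== SOURCE A (Python) =====
-- def make_diagonal(x):
-- 	retArr = []
-- 	for i in range(len(x)):
-- 		retArr.append([])
-- 		for j in range(len(x)):
-- 			if i == j:
-- 				retArr[i].append(x[i])
-- 			else:
-- 				retArr[i].append(0)
-- 	return retArr
-- 	pass
-- ===== SOURCE B (Python) =====
-- def make_diagonal(x):
--     n = len(x)
--     return [[0] * i + [v] + [0] * (n - 1 - i) for i, v in enumerate(x)]
-- ===== Notes on version B (the rewrite author's own statement) =====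
-- stated objective: alternative
-- what changed: Replaces A's nested index loop with an i==j test per cell by splicing each row directly from i leading zeros, the element x[i], and n-1-i trailing zeros over enumerate(x), removing the inner loop and branch entirely.
import Mathlib
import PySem

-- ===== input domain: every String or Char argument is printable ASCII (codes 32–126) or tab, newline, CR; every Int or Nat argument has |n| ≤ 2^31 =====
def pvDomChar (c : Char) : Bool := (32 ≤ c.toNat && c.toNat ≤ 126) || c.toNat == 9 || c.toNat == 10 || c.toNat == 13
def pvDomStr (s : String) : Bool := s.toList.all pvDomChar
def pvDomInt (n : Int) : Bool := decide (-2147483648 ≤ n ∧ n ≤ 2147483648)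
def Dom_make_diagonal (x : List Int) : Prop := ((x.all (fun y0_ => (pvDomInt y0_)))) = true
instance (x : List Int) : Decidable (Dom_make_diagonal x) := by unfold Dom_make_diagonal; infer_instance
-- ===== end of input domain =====

-- B replaces A's nested index loop (i==j branch per cell) by splicing each row directly from
-- i leading zeros, the element x[i], and n-1-i trailing zeros over enumerate(x).

-- ===== PORT A =====
-- retArr.append([]); then the inner loop appends to retArr[i] cell by cell
def make_diagonal (x : List Int) : List (List Int) :=
  (PySem.List.pyRange 0 (x.length : Int) 1).foldl
    (fun retArr i =>
      let retArr := retArr ++ [([] : List Int)]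
      (PySem.List.pyRange 0 (x.length : Int) 1).foldl
        (fun retArr j =>
          if i == j then
            PySem.List.pySetD retArr i ((PySem.List.pyGetD retArr i []) ++ [PySem.List.pyGetD x i 0])
          else
            PySem.List.pySetD retArr i ((PySem.List.pyGetD retArr i []) ++ [(0 : Int)]))
        retArr)
    []

-- ===== PORT B =====
-- the row comprehension over enumerate(x); Python's list repetition is empty for k ≤ 0,
-- which .toNat matches exactly
def make_diagonal_alt (x : List Int) : List (List Int) :=
  let n : Int := x.length
  (PySem.List.enumerate x 0).map (fun p =>
    List.replicate p.1.toNat (0 : Int) ++ [p.2] ++ List.replicate (n - 1 - p.1).toNat (0 : Int))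

-- ===== PRECONDITION & SPEC =====
def Spec_make_diagonal (x : List Int) (out : List (List Int)) : Prop := out = make_diagonal_alt x
instance (x : List Int) (out : List (List Int)) : Decidable (Spec_make_diagonal x out) := by unfold Spec_make_diagonal; infer_instance

-- ===== CLAIM (what is proved, stated in full; the proofs are below) =====
def Claim_equal_make_diagonal : Prop := ∀ (x : List Int), Dom_make_diagonal x → Spec_make_diagonal x (make_diagonal x)

-- ===== LEMMAS AND PROOFS =====

-- the canonical i-th row of the result
def pvRow (x : List Int) (i : Nat) : List Int :=
  (List.range x.length).map (fun j => if i = j then x.getD i 0 else 0)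

theorem pv_set_append {α : Type} : ∀ (A : List α) (b : α) (rest : List α) (v : α),
    (A ++ b :: rest).set A.length v = A ++ v :: rest := by
  intro A b rest v
  induction A with
  | nil => rfl
  | cons a t ih => simp [ih]

theorem pv_getD_append {α : Type} : ∀ (A : List α) (b : α) (rest : List α) (d : α),
    (A ++ b :: rest).getD A.length d = b := by
  intro A b rest d
  induction A with
  | nil => rfl
  | cons a t _ => simp

theorem pv_set_append' {α : Type} (A : List α) (b : α) (rest : List α) (v : α)
    (k : Nat) (h : A.length = k) : (A ++ b :: rest).set k v = A ++ v :: rest := by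
  rw [← h]; exact pv_set_append A b rest v

theorem pv_getD_append' {α : Type} (A : List α) (b : α) (rest : List α) (d : α)
    (k : Nat) (h : A.length = k) : (A ++ b :: rest).getD k d = b := by
  rw [← h]; exact pv_getD_append A b rest d

theorem pv_inner (x : List Int) (i : Nat) :
    ∀ (l : List Int) (pre : List (List Int)) (row : List Int), pre.length = i →
    l.foldl
      (fun retArr j =>
        if (i : Int) == j then
          PySem.List.pySetD retArr (i : Int) ((PySem.List.pyGetD retArr (i : Int) []) ++ [PySem.List.pyGetD x (i : Int) 0])
        else
          PySem.List.pySetD retArr (i : Int) ((PySem.List.pyGetD retArr (i : Int) []) ++ [(0 : Int)]))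
      (pre ++ [row]) =
    pre ++ [row ++ l.map (fun j => if (i : Int) = j then x.getD i 0 else 0)] := by
  intro l
  induction l with
  | nil => intro pre row h; simp
  | cons j t ih =>
    intro pre row h
    have hget : PySem.List.pyGetD (pre ++ [row]) (i : Int) ([] : List Int) = row := by
      simp only [PySem.List.pyGetD_natCast]
      exact pv_getD_append' pre row [] [] i h
    have hset : ∀ v, PySem.List.pySetD (pre ++ [row]) (i : Int) v = pre ++ [v] := by
      intro v
      simp only [PySem.List.pySetD_natCast]
      exact pv_set_append' pre row [] v i h
    simp only [List.foldl_cons, List.map_cons]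
    by_cases hij : (i : Int) = j
    · subst hij
      rw [if_pos (by simp), hget, hset, ih _ _ h]
      simp [PySem.List.pyGetD_natCast]
    · rw [if_neg (by simp [hij]), hget, hset, ih _ _ h]
      simp [hij]

theorem pv_rowmap (x : List Int) (i : Nat) :
    (PySem.List.pyRange 0 (x.length : Int) 1).map
      (fun j => if (i : Int) = j then x.getD i 0 else 0) = pvRow x i := by
  rw [PySem.List.pyRange_one]
  simp only [List.map_map, pvRow, Int.sub_zero, Int.toNat_natCast]
  apply List.map_congr_left
  intro j hj
  by_cases h : i = j <;> simp [h]

theorem pv_outerA (x : List Int) : ∀ (k : Nat),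
    (PySem.List.pyRange 0 (k : Int) 1).foldl
      (fun retArr i =>
        (PySem.List.pyRange 0 (x.length : Int) 1).foldl
          (fun retArr j =>
            if i == j then
              PySem.List.pySetD retArr i ((PySem.List.pyGetD retArr i []) ++ [PySem.List.pyGetD x i 0])
            else
              PySem.List.pySetD retArr i ((PySem.List.pyGetD retArr i []) ++ [(0 : Int)]))
          (retArr ++ [([] : List Int)]))
      [] = (List.range k).map (pvRow x) := by
  intro k
  induction k with
  | zero => simp [PySem.List.pyRange_one_eq_nil]
  | succ k ih =>
    have hcast : ((k + 1 : Nat) : Int) = (k : Int) + 1 := by push_cast; ring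
    rw [hcast, PySem.List.pyRange_one_succ_right (by positivity), List.foldl_append, ih]
    simp only [List.foldl_cons, List.foldl_nil]
    rw [pv_inner x k _ _ _ (by simp)]
    rw [pv_rowmap]
    simp [List.range_succ]

theorem pv_A_eq (x : List Int) : make_diagonal x = (List.range x.length).map (pvRow x) := by
  unfold make_diagonal
  exact pv_outerA x x.length

theorem pv_row_splice (x : List Int) (i : Nat) (h : i < x.length) :
    List.replicate i (0 : Int) ++ [x.getD i 0] ++ List.replicate (x.length - 1 - i) (0 : Int) =
      pvRow x i := by
  apply List.ext_getElem
  · simp [pvRow]; omega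
  · intro j h1 h2
    simp only [pvRow, List.getElem_map, List.getElem_range, List.append_assoc,
      List.singleton_append, List.getElem_append, List.getElem_replicate,
      List.length_replicate, List.getElem_cons]
    split_ifs <;> first | rfl | omega

theorem pv_B_eq (x : List Int) : make_diagonal_alt x = (List.range x.length).map (pvRow x) := by
  unfold make_diagonal_alt
  apply List.ext_getElem
  · simp [PySem.List.length_enumerate]
  · intro i h1 h2
    simp only [List.getElem_map, PySem.List.getElem_enumerate, List.getElem_range]
    have hi : i < x.length := by simpa using h1
    have h0 : ((0 : Int) + (i : Nat)).toNat = i := by omega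
    have h1' : (((x.length : Int)) - 1 - ((0 : Int) + (i : Nat))).toNat = x.length - 1 - i := by
      omega
    rw [h0, h1']
    have hx : x[i] = x.getD i 0 := (List.getD_eq_getElem x 0 hi).symm
    rw [hx]
    exact pv_row_splice x i hi

-- ===== VERDICT (by name: the statement is the Claim_ definition above) =====
theorem make_diagonal_spec : Claim_equal_make_diagonal := by
  intro x _
  unfold Spec_make_diagonal
  rw [pv_A_eq, pv_B_eq]
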